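-- pv_equiv track=rewrite | github.com/tkwang0530/LeetCode | 2111.py | kIncreasing
-- ===== SOURCE A (Python) =====
-- import bisect
-- from typing import List
--
-- def kIncreasing(arr: List[int], k: int) -> int:
--     n = len(arr)
--     # return the longest increasing subsequence's length of the subarray starting from index
--     def LIS(i):
--         dp = []
--         for j in range(i, n, k):
--             if not dp or dp[-1] <= arr[j]:
--                 dp.append(arr[j])
--                 continue
--             idx = bisect.bisect_right(dp, arr[j])
--             dp[idx] = arr[j]
--         return len(dp)
--
--     totalLIS = 0
--     for head in range(k):
--         totalLIS += LIS(head)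
--
--     return n - totalLIS
-- ===== SOURCE B (Python) =====
-- from typing import List
--
-- def kIncreasing(arr: List[int], k: int) -> int:
--     n = len(arr)
--     if k <= 0:
--         return n
--     groups = [[] for _ in range(k)]
--     for i, x in enumerate(arr):
--         groups[i % k].append(x)
--     total = 0
--     for g in groups:
--         vals = []
--         lens = []
--         for x in g:
--             best = 0
--             for v, l in zip(vals, lens):
--                 if v <= x and l > best:
--                     best = l
--             vals.append(x)
--             lens.append(best + 1)
--         m = 0
--         for l in lens:
--             if l > m:
--                 m = l
--         total += m
--     return n - total
-- ===== Notes on version B (the rewrite author's own statement) =====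
-- stated objective: alternative
-- what changed: Replaces per-stride patience sorting with bisect by a single-pass bucket distribution of arr into its k residue groups followed by a quadratic longest-non-decreasing-subsequence DP per group.
import Mathlib
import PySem

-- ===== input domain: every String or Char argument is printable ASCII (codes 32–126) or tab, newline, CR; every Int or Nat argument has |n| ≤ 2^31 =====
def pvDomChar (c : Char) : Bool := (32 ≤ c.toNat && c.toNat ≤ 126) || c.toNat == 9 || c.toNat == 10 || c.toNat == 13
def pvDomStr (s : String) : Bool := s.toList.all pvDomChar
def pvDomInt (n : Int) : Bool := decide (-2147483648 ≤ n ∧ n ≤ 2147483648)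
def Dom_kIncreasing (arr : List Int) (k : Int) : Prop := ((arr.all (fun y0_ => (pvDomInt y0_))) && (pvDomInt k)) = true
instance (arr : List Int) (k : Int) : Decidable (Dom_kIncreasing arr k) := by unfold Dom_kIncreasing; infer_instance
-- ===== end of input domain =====

-- B replaces patience sorting (bisect) per stride with a one-pass bucket distribution of arr
-- into its k residue groups followed by a quadratic longest-non-decreasing-subsequence DP per
-- group (objective: alternative algorithm, not claimed faster).

-- ===== PORT A =====

-- bisect.bisect_right: lo=0, hi=len; while lo<hi: mid=(lo+hi)//2; x<a[mid] → hi=mid else lo=mid+1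
def pvBisectGo (dp : List Int) (x : Int) (lo hi : Nat) : Nat :=
  if _h : lo < hi then
    if x < dp.getD ((lo + hi) / 2) 0 then pvBisectGo dp x lo ((lo + hi) / 2)
    else pvBisectGo dp x ((lo + hi) / 2 + 1) hi
  else lo
termination_by hi - lo
decreasing_by all_goals omega

def pvBisectRight (dp : List Int) (x : Int) : Nat := pvBisectGo dp x 0 dp.length

-- loop body of LIS: 'if not dp or dp[-1] <= arr[j]: dp.append(..) else dp[idx] = ..'
def pvLisStep (dp : List Int) (x : Int) : List Int :=
  if dp = [] ∨ PySem.List.pyGetD dp (-1) 0 ≤ x then dp ++ [x]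
  else dp.set (pvBisectRight dp x) x

-- inner function LIS(i); dp[-1] / arr[j] are in range on every reached state (pyGetD exact there)
def pvLIS (arr : List Int) (n k i : Int) : Int :=
  ((PySem.List.pyRange i n k).foldl
    (fun dp j => pvLisStep dp (PySem.List.pyGetD arr j 0)) []).length

def kIncreasing (arr : List Int) (k : Int) : Int :=
  let n : Int := arr.length
  let totalLIS := (PySem.List.pyRange 0 k 1).foldl (fun tot head => tot + pvLIS arr n k head) 0
  n - totalLIS

-- ===== PORT B =====

-- 'groups[i % k].append(x)'
def pvDistStep (k : Int) (gs : List (List Int)) (ix : Int × Int) : List (List Int) :=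
  gs.set (ix.1 % k).toNat (gs.getD (ix.1 % k).toNat [] ++ [ix.2])

-- 'groups = [[] for _ in range(k)]; for i, x in enumerate(arr): groups[i % k].append(x)'
def pvGroups (arr : List Int) (k : Int) : List (List Int) :=
  (PySem.List.enumerate arr 0).foldl (pvDistStep k)
    ((PySem.List.pyRange 0 k 1).map (fun _ => []))

-- 'best = 0; for v, l in zip(vals, lens): if v <= x and l > best: best = l'
def pvBest (vals lens : List Int) (x : Int) : Int :=
  (vals.zip lens).foldl (fun b vl => if vl.1 ≤ x ∧ vl.2 > b then vl.2 else b) 0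

-- 'for x in g: ... vals.append(x); lens.append(best + 1)'
def pvDP (g : List Int) : List Int × List Int :=
  g.foldl (fun vl x => (vl.1 ++ [x], vl.2 ++ [pvBest vl.1 vl.2 x + 1])) ([], [])

-- 'm = 0; for l in lens: if l > m: m = l'
def pvGroupMax (g : List Int) : Int :=
  (pvDP g).2.foldl (fun m l => if l > m then l else m) 0

def kIncreasing_alt (arr : List Int) (k : Int) : Int :=
  let n : Int := arr.length
  if k ≤ 0 then n
  else n - (pvGroups arr k).foldl (fun tot g => tot + pvGroupMax g) 0

-- ===== PRECONDITION & SPEC =====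
def Spec_kIncreasing (arr : List Int) (k : Int) (out : Int) : Prop := out = kIncreasing_alt arr k
instance (arr : List Int) (k : Int) (out : Int) : Decidable (Spec_kIncreasing arr k out) := by unfold Spec_kIncreasing; infer_instance

-- ===== CLAIM (what is proved, stated in full; the proofs are below) =====
def Claim_equal_kIncreasing : Prop := ∀ (arr : List Int) (k : Int), Dom_kIncreasing arr k → Spec_kIncreasing arr k (kIncreasing arr k)

-- ===== LEMMAS AND PROOFS =====

-- pvF q v = length of the longest non-decreasing subsequence, with last element ≤ v, of the
-- processed prefix REVERSED into q (most recent element first); pvFm q = without the bound.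
def pvF : List Int → Int → Int
  | [], _ => 0
  | x :: r, v => if x ≤ v then max (pvF r v) (pvF r x + 1) else pvF r v

def pvFm : List Int → Int
  | [] => 0
  | x :: r => max (pvFm r) (pvF r x + 1)

-- split of a sorted list at threshold x
theorem pv_sorted_split (dp : List Int) (x : Int) (h : dp.Pairwise (· ≤ ·)) :
    ∃ l r, dp = l ++ r ∧ (∀ a ∈ l, a ≤ x) ∧ (∀ a ∈ r, x < a) := by
  induction dp with
  | nil => exact ⟨[], [], rfl, by simp, by simp⟩
  | cons y t ih =>
    rcases List.pairwise_cons.mp h with ⟨hy, ht⟩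
    by_cases hyx : y ≤ x
    · rcases ih ht with ⟨l, r, hdp, hl, hr⟩
      exact ⟨y :: l, r, by simp [hdp], by
        intro a ha; rcases List.mem_cons.mp ha with h | h
        · exact h ▸ hyx
        · exact hl a h, hr⟩
    · exact ⟨[], y :: t, rfl, by simp, by
        intro a ha; rcases List.mem_cons.mp ha with h | h
        · omega
        · exact lt_of_lt_of_le (by omega) (hy a h)⟩

theorem pv_bisect_go (l r : List Int) (x : Int)
    (hl : ∀ a ∈ l, a ≤ x) (hr : ∀ a ∈ r, x < a) :
    ∀ d lo hi, hi - lo ≤ d → lo ≤ l.length → l.length ≤ hi → hi ≤ (l ++ r).length →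
      pvBisectGo (l ++ r) x lo hi = l.length := by
  intro d
  induction d with
  | zero =>
    intro lo hi h1 h2 h3 h4
    rw [pvBisectGo, dif_neg (by omega)]
    omega
  | succ d ih =>
    intro lo hi h1 h2 h3 h4
    by_cases hlh : lo < hi
    · rw [pvBisectGo, dif_pos hlh]
      have hmlo : lo ≤ (lo + hi) / 2 := by omega
      have hmhi : (lo + hi) / 2 < hi := by omega
      have hmlen : (lo + hi) / 2 < (l ++ r).length := by omega
      rw [List.getD_eq_getElem _ _ hmlen]
      by_cases hc : (lo + hi) / 2 < l.length
      · rw [List.getElem_append_left hc,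
          if_neg (not_lt.mpr (hl _ (List.getElem_mem _)))]
        exact ih ((lo + hi) / 2 + 1) hi (by omega) (by omega) h3 h4
      · rw [List.getElem_append_right (by omega),
          if_pos (hr _ (List.getElem_mem _))]
        exact ih lo ((lo + hi) / 2) (by omega) h2 (by omega) (by omega)
    · rw [pvBisectGo, dif_neg hlh]
      omega

theorem pv_bisect_eq (l r : List Int) (x : Int)
    (hl : ∀ a ∈ l, a ≤ x) (hr : ∀ a ∈ r, x < a) :
    pvBisectRight (l ++ r) x = l.length := by
  apply pv_bisect_go l r x hl hr ((l ++ r).length) 0 (l ++ r).length <;> simp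

def pvInvA (q dp : List Int) : Prop :=
  dp.Pairwise (· ≤ ·) ∧
  (∀ v, ((dp.countP (fun y => decide (y ≤ v)) : Nat) : Int) = pvF q v) ∧
  ((dp.length : Int) = pvFm q)

theorem pv_set_append (l t : List Int) (a x : Int) :
    (l ++ a :: t).set l.length x = l ++ x :: t := by
  induction l with
  | nil => rfl
  | cons y l ih => simp [ih]

theorem pvInvA_step (q dp : List Int) (x : Int) (h : pvInvA q dp) :
    pvInvA (x :: q) (pvLisStep dp x) := by
  obtain ⟨hs, hc, hl⟩ := h
  obtain ⟨l, r, hdp, hlle, hrgt⟩ := pv_sorted_split dp x hs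
  have hcl : l.countP (fun y => decide (y ≤ x)) = l.length :=
    List.countP_eq_length.mpr (by intro a ha; simpa using hlle a ha)
  unfold pvLisStep
  by_cases hcond : dp = [] ∨ PySem.List.pyGetD dp (-1) 0 ≤ x
  · rw [if_pos hcond]
    -- in the append case every element of dp is ≤ x, i.e. r = []
    have hre : r = [] := by
      rcases hcond with hnil | hlast
      · rw [hnil] at hdp
        exact (List.append_eq_nil_iff.mp hdp.symm).2
      · by_contra hne
        have hdne : dp ≠ [] := by rw [hdp]; simp [hne]
        rw [PySem.List.pyGetD_neg_one dp 0 hdne] at hlast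
        have h2 : dp.getLast hdne ∈ r := by
          have h3 : ∀ (hx : (l ++ r) ≠ []), (l ++ r).getLast hx ∈ r := by
            intro hx
            rw [List.getLast_append, dif_neg (by simpa using hne)]
            exact List.getLast_mem _
          subst hdp
          exact h3 hdne
        exact absurd hlast (not_le.mpr (hrgt _ h2))
    subst hre
    have hdl : dp = l := by rw [hdp, List.append_nil]
    simp only [hdl] at hc hl hs ⊢
    refine ⟨?_, ?_, ?_⟩
    · exact List.pairwise_append.mpr ⟨hs, List.pairwise_singleton _ _,
        by intro a ha b hb; rw [List.mem_singleton] at hb; exact hb ▸ hlle a ha⟩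
    · intro v
      have hv := hc v
      have hx := hc x
      rw [hcl] at hx
      simp only [List.countP_append, pvF]
      by_cases hxv : x ≤ v
      · have hclv : l.countP (fun y => decide (y ≤ v)) = l.length :=
          List.countP_eq_length.mpr
            (by intro a ha; simp only [decide_eq_true_eq]; exact le_trans (hlle a ha) hxv)
        have h1 : List.countP (fun y => decide (y ≤ v)) [x] = 1 := by simp [hxv]
        rw [if_pos hxv, hclv, h1]
        omega
      · have h1 : List.countP (fun y => decide (y ≤ v)) [x] = 0 := by simp [hxv]
        rw [if_neg hxv, h1]
        omega
    · have hx := hc x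
      rw [hcl] at hx
      simp only [List.length_append, List.length_singleton, pvFm]
      omega
  · rw [if_neg hcond]
    rw [not_or, not_le] at hcond
    obtain ⟨hdne, hlast⟩ := hcond
    rw [PySem.List.pyGetD_neg_one dp 0 hdne] at hlast
    have hrne : r ≠ [] := by
      intro hre
      subst hre
      rw [List.append_nil] at hdp
      have hmem : dp.getLast hdne ∈ l := by rw [← hdp]; exact List.getLast_mem hdne
      exact absurd (hlle _ hmem) (not_le.mpr hlast)
    obtain ⟨a, t, hrat⟩ := List.exists_cons_of_ne_nil hrne
    subst hrat
    have hbis : pvBisectRight dp x = l.length := by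
      rw [hdp]; exact pv_bisect_eq l (a :: t) x hlle hrgt
    rw [hbis, hdp, pv_set_append]
    have hax : x < a := hrgt a (by simp)
    have hs' : (l ++ a :: t).Pairwise (· ≤ ·) := by rw [← hdp]; exact hs
    have hat : ∀ b ∈ t, a ≤ b := (List.pairwise_cons.mp (List.pairwise_append.mp hs').2.1).1
    have hls : l.Pairwise (· ≤ ·) := (List.pairwise_append.mp hs').1
    have hts : t.Pairwise (· ≤ ·) :=
      (List.pairwise_cons.mp (List.pairwise_append.mp hs').2.1).2
    have hctx : t.countP (fun y => decide (y ≤ x)) = 0 :=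
      List.countP_eq_zero.mpr (by
        intro b hb; simp only [decide_eq_true_eq, not_le]
        exact lt_of_lt_of_le hax (hat b hb))
    refine ⟨?_, ?_, ?_⟩
    · refine List.pairwise_append.mpr ⟨hls, ?_, ?_⟩
      · exact List.pairwise_cons.mpr ⟨fun b hb => le_trans (le_of_lt hax) (hat b hb), hts⟩
      · intro p hp b hb
        rcases List.mem_cons.mp hb with hb | hb
        · exact hb ▸ hlle p hp
        · exact le_trans (hlle p hp) (le_trans (le_of_lt hax) (hat b hb))
    · intro v
      have hv := hc v
      have hx := hc x
      rw [hdp] at hv hx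
      have hdax : (decide (a ≤ x)) = false := by simp only [decide_eq_false_iff_not]; omega
      simp only [List.countP_append, List.countP_cons, hcl, hctx, hdax, if_false,
        Bool.false_eq_true] at hv hx
      simp only [List.countP_append, List.countP_cons, pvF]
      by_cases hxv : x ≤ v
      · have hclv : l.countP (fun y => decide (y ≤ v)) = l.length :=
          List.countP_eq_length.mpr
            (by intro p hp; simp only [decide_eq_true_eq]; exact le_trans (hlle p hp) hxv)
        rw [if_pos hxv]
        by_cases hav : a ≤ v
        · simp only [hclv, decide_eq_true_eq, if_pos hav, if_pos hxv] at hv ⊢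
          omega
        · have hctv : t.countP (fun y => decide (y ≤ v)) = 0 :=
            List.countP_eq_zero.mpr (by
              intro b hb; simp only [decide_eq_true_eq, not_le]
              exact lt_of_lt_of_le (by omega) (hat b hb))
          simp only [hclv, hctv, decide_eq_true_eq, if_neg hav, if_pos hxv] at hv ⊢
          omega
      · have hav : ¬ a ≤ v := by omega
        rw [if_neg hxv]
        simp only [decide_eq_true_eq, if_neg hav, if_neg hxv] at hv ⊢
        omega
    · have hx := hc x
      rw [hdp] at hx
      have hdax : (decide (a ≤ x)) = false := by simp only [decide_eq_false_iff_not]; omega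
      simp only [List.countP_append, List.countP_cons, hcl, hctx, hdax, if_false,
        Bool.false_eq_true] at hx
      rw [hdp] at hl
      simp only [List.length_append, List.length_cons, pvFm] at hl ⊢
      omega

theorem pvInvA_fold (p : List Int) : pvInvA p.reverse (p.foldl pvLisStep []) := by
  induction p using List.reverseRecOn with
  | nil =>
    refine ⟨List.Pairwise.nil, ?_, by simp [pvFm]⟩
    intro v; simp [pvF]
  | append_singleton p x ih =>
    rw [List.foldl_append, List.reverse_append]
    exact pvInvA_step p.reverse _ x ih

def pvInvB (q : List Int) : Prop :=
  (pvDP q).1 = q ∧ (pvDP q).2.length = q.length ∧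
  (∀ x, pvBest (pvDP q).1 (pvDP q).2 x = pvF q.reverse x) ∧
  ((pvDP q).2.foldl (fun m l => if l > m then l else m) 0 = pvFm q.reverse)

theorem pvInvB_fold (p : List Int) : pvInvB p := by
  induction p using List.reverseRecOn with
  | nil => exact ⟨rfl, rfl, fun x => rfl, rfl⟩
  | append_singleton p y ih =>
    obtain ⟨h1, h2, h3, h4⟩ := ih
    have hdp : pvDP (p ++ [y]) =
        ((pvDP p).1 ++ [y], (pvDP p).2 ++ [pvBest (pvDP p).1 (pvDP p).2 y + 1]) := by
      unfold pvDP
      rw [List.foldl_append]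
      rfl
    have hlen : (pvDP p).1.length = (pvDP p).2.length := by rw [h1, h2]
    have hrev : (p ++ [y]).reverse = y :: p.reverse := by simp
    refine ⟨?_, ?_, ?_, ?_⟩
    · rw [hdp, h1]
    · rw [hdp]
      simp only [List.length_append, List.length_singleton, h2]
    · intro x
      rw [hdp]
      unfold pvBest
      rw [List.zip_append hlen, List.foldl_append]
      simp only [List.zip_cons_cons, List.zip_nil_right, List.foldl_cons, List.foldl_nil]
      have hbx : List.foldl (fun b vl => if vl.1 ≤ x ∧ vl.2 > b then vl.2 else b) 0
          ((pvDP p).1.zip (pvDP p).2) = pvF p.reverse x := h3 x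
      have hby := h3 y
      unfold pvBest at hby
      rw [hbx, hby, hrev]
      simp only [pvF]
      by_cases hyx : y ≤ x
      · rw [if_pos hyx]
        simp only [hyx, true_and]
        split_ifs <;> omega
      · rw [if_neg hyx, if_neg (by simp [hyx])]
    · rw [hdp, List.foldl_append]
      simp only [List.foldl_cons, List.foldl_nil]
      rw [h4, h3 y, hrev]
      simp only [pvFm]
      split_ifs <;> omega

theorem pv_group_eq (g : List Int) :
    (((g.foldl pvLisStep []).length : Nat) : Int) = pvGroupMax g := by
  rcases pvInvA_fold g with ⟨_, _, hlen⟩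
  rcases pvInvB_fold g with ⟨_, _, _, hmax⟩
  rw [hlen, pvGroupMax, hmax]

-- pyRange with positive step, one more stop
theorem pv_pyRange_succ (h m k : Int) (hk : 0 < k) (hh : 0 ≤ h) (hm : 0 ≤ m) :
    PySem.List.pyRange h (m + 1) k =
      PySem.List.pyRange h m k ++ (if h ≤ m ∧ k ∣ (m - h) then [m] else []) := by
  rw [PySem.List.pyRange_of_pos _ _ hk, PySem.List.pyRange_of_pos _ _ hk]
  by_cases hhm : h ≤ m
  · have hd0 : (0:Int) ≤ m - h := by omega
    have hqr : m - h = k * ((m - h) / k) + (m - h) % k := (Int.ediv_add_emod (m - h) k).symm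
    have hr0 : 0 ≤ (m - h) % k := Int.emod_nonneg (m - h) (by omega)
    have hrk : (m - h) % k < k := Int.emod_lt_of_pos (m - h) hk
    have hq0 : 0 ≤ (m - h) / k := Int.ediv_nonneg hd0 (by omega)
    have hkq0 : 0 ≤ k * ((m - h) / k) := mul_nonneg (by omega) hq0
    have hcount1 : (m + 1 - h + k - 1) / k = (m - h) / k + 1 := by
      have he : m + 1 - h + k - 1 = (m - h) % k + k * ((m - h) / k + 1) := by
        linear_combination hqr
      rw [he, Int.add_mul_ediv_left _ _ (by omega : k ≠ 0),
        Int.ediv_eq_zero_of_lt hr0 hrk]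
      omega
    have e1 : (if h < m + 1 then ((m + 1 - h + k - 1) / k).toNat else 0)
        = ((m - h) / k).toNat + 1 := by
      rw [if_pos (by omega), hcount1]
      omega
    rw [e1]
    by_cases hdv : k ∣ (m - h)
    · have hrz : (m - h) % k = 0 := Int.emod_eq_zero_of_dvd hdv
      have e0 : (if h < m then ((m - h + k - 1) / k).toNat else 0) = ((m - h) / k).toNat := by
        by_cases hlt : h < m
        · rw [if_pos hlt]
          congr 1
          have he : m - h + k - 1 = (k - 1) + k * ((m - h) / k) := by linear_combination hqr + hrz
          rw [he, Int.add_mul_ediv_left _ _ (by omega : k ≠ 0),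
            Int.ediv_eq_zero_of_lt (by omega) (by omega)]
          omega
        · rw [if_neg hlt]
          have hd : m - h = 0 := by omega
          rw [hd, Int.zero_ediv]
          rfl
      have e2 : (if h ≤ m ∧ k ∣ (m - h) then ([m] : List Int) else []) = [m] :=
        if_pos ⟨hhm, hdv⟩
      rw [e0, e2, List.range_succ, List.map_append]
      congr 1
      simp only [List.map_cons, List.map_nil]
      rw [show ((((m - h) / k).toNat : Int)) = (m - h) / k by omega]
      have hm' : h + k * ((m - h) / k) = m := by linarith [hqr, hrz]
      rw [hm']
    · have hrne : (m - h) % k ≠ 0 := fun h0 => hdv (Int.dvd_of_emod_eq_zero h0)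
      have hlt : h < m := by
        by_contra hge
        have hd : m - h = 0 := by omega
        rw [hd, Int.zero_emod] at hrne
        exact hrne rfl
      have e0 : (if h < m then ((m - h + k - 1) / k).toNat else 0)
          = ((m - h) / k).toNat + 1 := by
        rw [if_pos hlt]
        have he : m - h + k - 1 = ((m - h) % k - 1) + k * ((m - h) / k + 1) := by
          linear_combination hqr
        rw [he, Int.add_mul_ediv_left _ _ (by omega : k ≠ 0),
          Int.ediv_eq_zero_of_lt (by omega) (by omega)]
        omega
      have e2 : (if h ≤ m ∧ k ∣ (m - h) then ([m] : List Int) else []) = [] :=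
        if_neg (fun hc => hdv hc.2)
      rw [e0, e2, List.append_nil]
  · have e1 : (if h < m + 1 then ((m + 1 - h + k - 1) / k).toNat else 0) = 0 :=
      if_neg (by omega)
    have e0 : (if h < m then ((m - h + k - 1) / k).toNat else 0) = 0 := if_neg (by omega)
    have e2 : (if h ≤ m ∧ k ∣ (m - h) then ([m] : List Int) else []) = [] :=
      if_neg (fun hc => hhm hc.1)
    rw [e1, e0, e2]
    simp

theorem pv_groups_append (p : List Int) (y : Int) (k : Int) :
    pvGroups (p ++ [y]) k = pvDistStep k (pvGroups p k) (((p.length : Int)), y) := by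
  unfold pvGroups
  rw [PySem.List.enumerate_append, List.foldl_append]
  simp [PySem.List.enumerate_cons, PySem.List.enumerate_nil]

theorem pv_map_stride (p : List Int) (y : Int) (k : Int) (hk : 0 < k) (h : Nat) :
    (PySem.List.pyRange (h : Int) (p.length : Int) k).map
        (fun j => PySem.List.pyGetD (p ++ [y]) j 0)
      = (PySem.List.pyRange (h : Int) (p.length : Int) k).map
        (fun j => PySem.List.pyGetD p j 0) := by
  apply List.map_congr_left
  intro j hj
  obtain ⟨h1, h2, h3⟩ := (PySem.List.mem_pyRange_iff_of_pos hk j).mp hj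
  have hj0 : (0:Int) ≤ j := le_trans (by positivity) h1
  rw [show j = ((j.toNat : Nat) : Int) by omega, PySem.List.pyGetD_natCast,
    PySem.List.pyGetD_natCast, List.getD_append p [y] 0 j.toNat (by omega)]

theorem pv_groups_spec (arr : List Int) (k : Int) (hk : 0 < k) :
    (pvGroups arr k).length = k.toNat ∧
    ∀ h : Nat, h < k.toNat →
      (pvGroups arr k).getD h [] =
        (PySem.List.pyRange (h : Int) (arr.length : Int) k).map
          (fun j => PySem.List.pyGetD arr j 0) := by
  induction arr using List.reverseRecOn with
  | nil =>
    constructor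
    · unfold pvGroups
      simp [PySem.List.length_pyRange_one]
    · intro h hh
      have hrk : PySem.List.pyRange (h : Int) ((List.length ([] : List Int) : Nat) : Int) k
          = [] := by
        rw [PySem.List.pyRange_of_pos _ _ hk]
        rw [if_neg (by simp)]
        simp
      rw [hrk]
      unfold pvGroups
      simp only [PySem.List.enumerate_nil, List.foldl_nil, List.map_nil]
      have hlen : h < ((PySem.List.pyRange 0 k 1).map
          (fun _ => ([] : List Int))).length := by
        simp [PySem.List.length_pyRange_one]
        omega
      rw [List.getD_eq_getElem _ _ hlen, List.getElem_map]
  | append_singleton p y ih =>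
    obtain ⟨ihl, ihg⟩ := ih
    have hb0 : (0:Int) ≤ (p.length : Int) % k := Int.emod_nonneg _ (by omega)
    have hbk : ((p.length : Int) % k) < k := Int.emod_lt_of_pos _ hk
    have hqr := Int.ediv_add_emod ((p.length : Int)) k
    have hq0 : (0:Int) ≤ (p.length : Int) / k := Int.ediv_nonneg (by positivity) (by omega)
    have hkq0 : (0:Int) ≤ k * ((p.length : Int) / k) := mul_nonneg (by omega) hq0
    rw [pv_groups_append]
    unfold pvDistStep
    simp only []
    constructor
    · rw [List.length_set]; exact ihl
    · intro h hh
      have hlen1 : (p ++ [y]).length = p.length + 1 := by simp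
      have hcast : (((p ++ [y]).length : Nat) : Int) = (p.length : Int) + 1 := by
        rw [hlen1]; push_cast; ring
      rw [hcast, pv_pyRange_succ _ _ _ hk (by positivity) (by positivity)]
      by_cases hhb : h = (((p.length : Int)) % k).toNat
      · have hbi : ((h : Nat) : Int) = (p.length : Int) % k := by omega
        have hdvd : k ∣ ((p.length : Int) - (h : Int)) := by
          refine ⟨(p.length : Int) / k, ?_⟩
          rw [hbi]
          linear_combination - hqr
        have hle : ((h : Nat) : Int) ≤ (p.length : Int) := by
          rw [hbi]; linarith
        rw [if_pos ⟨hle, hdvd⟩, List.map_append]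
        have hset : h < (pvGroups p k).length := by rw [ihl]; exact hh
        rw [List.getD_eq_getElem _ _ (by rw [List.length_set]; exact hset)]
        rw [← hhb, List.getElem_set_self]
        rw [ihg h hh, pv_map_stride p y k hk h]
        congr 1
        simp only [List.map_cons, List.map_nil]
        rw [PySem.List.pyGetD_natCast, List.getD_append_right p [y] 0 p.length (le_refl _)]
        simp
      · have hne : (((p.length : Int)) % k).toNat ≠ h := fun he => hhb he.symm
        have hset : h < (pvGroups p k).length := by rw [ihl]; exact hh
        rw [List.getD_eq_getElem _ _ (by rw [List.length_set]; exact hset)]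
        rw [List.getElem_set_ne hne, ← List.getD_eq_getElem _ _ hset]
        have hcond : ¬ (((h : Nat) : Int) ≤ (p.length : Int) ∧
            k ∣ ((p.length : Int) - (h : Int))) := by
          rintro ⟨hle, c, hc⟩
          apply hhb
          have h1 : ((p.length : Int)) % k = (h : Int) := by
            have he : (p.length : Int) = (h : Int) + k * c := by linarith
            rw [he, Int.add_mul_emod_self_left]
            exact Int.emod_eq_of_lt (by positivity) (by omega)
          omega
        rw [if_neg hcond, List.append_nil, ihg h hh, pv_map_stride p y k hk h]

theorem pv_main (arr : List Int) (k : Int) : kIncreasing arr k = kIncreasing_alt arr k := by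
  by_cases hk : k ≤ 0
  · simp only [kIncreasing, kIncreasing_alt, if_pos hk]
    rw [PySem.List.pyRange_one_eq_nil hk]
    simp
  · have hk' : 0 < k := by omega
    obtain ⟨hgl, hgg⟩ := pv_groups_spec arr k hk'
    simp only [kIncreasing, kIncreasing_alt, if_neg hk]
    rw [PySem.List.foldl_add, PySem.List.foldl_add]
    have hmaps : (PySem.List.pyRange 0 k 1).map (fun head => pvLIS arr (arr.length : Int) k head)
        = (pvGroups arr k).map (fun g => pvGroupMax g) := by
      apply List.ext_getElem
      · rw [List.length_map, List.length_map, hgl, PySem.List.length_pyRange_one]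
        congr 1
        omega
      · intro i h1 h2
        have hik : i < k.toNat := by
          rw [List.length_map, PySem.List.length_pyRange_one] at h1
          omega
        rw [List.getElem_map, List.getElem_map]
        rw [PySem.List.getElem_pyRange_one]
        have hgi : (pvGroups arr k)[i] =
            (PySem.List.pyRange (i : Int) (arr.length : Int) k).map
              (fun j => PySem.List.pyGetD arr j 0) := by
          rw [← List.getD_eq_getElem _ _ (by rw [hgl]; exact hik), hgg i hik]
        rw [hgi]
        unfold pvLIS
        rw [zero_add]
        rw [← pv_group_eq]
        rw [List.foldl_map]
    rw [hmaps]

-- ===== VERDICT (by name: the statement is the Claim_ definition above) =====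
theorem kIncreasing_spec : Claim_equal_kIncreasing := by
  intro arr k _
  show kIncreasing arr k = kIncreasing_alt arr k
  exact pv_main arr k
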